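-- pv_equiv track=rewrite | github.com/gaikwadadi/automation-query-generator | query_utils.py | extract_first_bracketed
-- ===== SOURCE A (Python) =====
-- def extract_first_bracketed(s: str) -> str:
--     s = s.strip()
--     start_index = None
--     start_char = None
--     for i, ch in enumerate(s):
--         if ch in "{[":
--             start_index = i
--             start_char = ch
--             break
--     if start_index is None:
--         return s
--     stack = [start_char]
--     for j in range(start_index + 1, len(s)):
--         c = s[j]
--         if c in "{[":
--             stack.append(c)
--         elif c in "]}":
--             if not stack:
--                 break
--             stack.pop()
--             if not stack:
--                 return s[start_index:j+1]
--     return s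
-- ===== SOURCE B (Python) =====
-- def extract_first_bracketed(s: str) -> str:
--     s = s.strip()
--     opens = [i for i, ch in enumerate(s) if ch in "{["]
--     if not opens:
--         return s
--     start = opens[0]
--     closes = [j for j, ch in enumerate(s) if ch in "]}" and j > start]
--     k = 0  # number of opener positions <= the current closer position
--     for r, p in enumerate(closes):
--         while k < len(opens) and opens[k] < p:
--             k += 1
--         if k == r + 1:  # balance over s[start:p+1] is zero for the first time
--             return s[start:p + 1]
--     return s
-- ===== Notes on version B (the rewrite author's own statement) =====
-- stated objective: alternative
-- what changed: Instead of A's character scan maintaining an explicit bracket stack, B first builds the sorted position lists of openers and closers in two comprehension passes and then runs a two-pointer merge over those index lists, returning at the first closer whose rank equals the number of opener positions before it.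
import Mathlib
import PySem

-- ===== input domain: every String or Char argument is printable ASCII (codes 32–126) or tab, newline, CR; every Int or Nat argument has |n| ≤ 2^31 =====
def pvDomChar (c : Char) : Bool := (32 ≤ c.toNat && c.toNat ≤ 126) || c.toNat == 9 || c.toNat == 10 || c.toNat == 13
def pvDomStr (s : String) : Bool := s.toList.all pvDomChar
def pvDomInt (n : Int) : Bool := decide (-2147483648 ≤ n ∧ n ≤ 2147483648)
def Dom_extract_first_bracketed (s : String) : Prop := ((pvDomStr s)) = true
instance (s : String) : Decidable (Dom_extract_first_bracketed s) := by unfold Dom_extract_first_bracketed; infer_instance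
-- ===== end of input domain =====

-- B replaces A's stack-driven character scan by two position-index lists (openers, closers)
-- merged with a two-pointer walk (objective: alternative, same cost).

-- ===== PORT A =====
-- first loop: enumerate with break — first opener's index, its char, the remaining chars
def pvFindA : List Char → Int → Option (Int × Char × List Char)
  | [], _ => none
  | c :: rest, i => if c = '{' ∨ c = '[' then some (i, c, rest) else pvFindA rest (i + 1)

-- second loop over j = start+1 … len-1 with the explicit stack; s[start:j+1] is PySem slice
def pvLoopA (l : List Char) (start : Int) : List Char → Int → List Char → String
  | [], _, _ => String.ofList l
  | c :: rest, j, stack =>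
    if c = '{' ∨ c = '[' then pvLoopA l start rest (j + 1) (c :: stack)
    else if c = ']' ∨ c = '}' then
      match stack with
      | [] => String.ofList l                  -- 'break' then fall through to 'return s'
      | _ :: tl =>
        if tl = [] then String.ofList (PySem.List.slice l (some start) (some (j + 1)))
        else pvLoopA l start rest (j + 1) tl
    else pvLoopA l start rest (j + 1) stack

def extract_first_bracketed (s : String) : String :=
  let l := (PySem.Str.strip s).toList
  match pvFindA l 0 with
  | none => String.ofList l
  | some (i, c, rest) => pvLoopA l i rest (i + 1) [c]

-- ===== PORT B =====
-- the inner 'while k < len(opens) and opens[k] < p: k += 1' (opens kept as its unconsumed suffix)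
def pvAdvanceB : List Int → Nat → Int → List Int × Nat
  | [], k, _ => ([], k)
  | o :: os, k, p => if o < p then pvAdvanceB os (k + 1) p else (o :: os, k)

-- the 'for r, p in enumerate(closes)' two-pointer loop
def pvLoopB (l : List Char) (start : Int) : List Int → Nat → List Int → Nat → String
  | _, _, [], _ => String.ofList l
  | os, k, p :: ps, r =>
    let a := pvAdvanceB os k p
    if a.2 = r + 1 then String.ofList (PySem.List.slice l (some start) (some (p + 1)))
    else pvLoopB l start a.1 a.2 ps (r + 1)

def extract_first_bracketed_alt (s : String) : String :=
  let l := (PySem.Str.strip s).toList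
  let opens := ((PySem.List.enumerate l 0).filter (fun q => q.2 = '{' ∨ q.2 = '[')).map Prod.fst
  match opens with
  | [] => String.ofList l
  | start :: _ =>
    let closes := ((PySem.List.enumerate l 0).filter
        (fun q => (q.2 = ']' ∨ q.2 = '}') ∧ start < q.1)).map Prod.fst
    pvLoopB l start opens 0 closes 0

-- ===== PRECONDITION & SPEC =====
def Spec_extract_first_bracketed (s : String) (out : String) : Prop := out = extract_first_bracketed_alt s
instance (s : String) (out : String) : Decidable (Spec_extract_first_bracketed s out) := by unfold Spec_extract_first_bracketed; infer_instance

-- ===== CLAIM (what is proved, stated in full; the proofs are below) =====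
def Claim_equal_extract_first_bracketed : Prop := ∀ (s : String), Dom_extract_first_bracketed s → Spec_extract_first_bracketed s (extract_first_bracketed s)

-- ===== LEMMAS AND PROOFS =====

-- index lists of the openers / closers of a char list whose first index is j
def openIdx : List Char → Int → List Int
  | [], _ => []
  | c :: rest, j => if c = '{' ∨ c = '[' then j :: openIdx rest (j + 1) else openIdx rest (j + 1)

def closeIdx : List Char → Int → List Int
  | [], _ => []
  | c :: rest, j => if c = ']' ∨ c = '}' then j :: closeIdx rest (j + 1) else closeIdx rest (j + 1)

theorem mem_openIdx_ge : ∀ (t : List Char) (j : Int) (x : Int), x ∈ openIdx t j → j ≤ x := by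
  intro t
  induction t with
  | nil => intro j x h; simp [openIdx] at h
  | cons c rest ih =>
    intro j x h
    by_cases hc : c = '{' ∨ c = '['
    · simp [openIdx, hc] at h
      rcases h with h | h
      · omega
      · have := ih (j + 1) x h; omega
    · simp [openIdx, hc] at h
      have := ih (j + 1) x h; omega

theorem mem_closeIdx_ge : ∀ (t : List Char) (j : Int) (x : Int), x ∈ closeIdx t j → j ≤ x := by
  intro t
  induction t with
  | nil => intro j x h; simp [closeIdx] at h
  | cons c rest ih =>
    intro j x h
    by_cases hc : c = ']' ∨ c = '}'
    · simp [closeIdx, hc] at h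
      rcases h with h | h
      · omega
      · have := ih (j + 1) x h; omega
    · simp [closeIdx, hc] at h
      have := ih (j + 1) x h; omega

-- an opener index smaller than every pending closer is consumed by the first advance
theorem pvLoopB_shift (l : List Char) (st i : Int) (os : List Int) (k r : Nat)
    (cs : List Int) (h : ∀ p ∈ cs, i < p) :
    pvLoopB l st (i :: os) k cs r = pvLoopB l st os (k + 1) cs r := by
  cases cs with
  | nil => simp [pvLoopB]
  | cons p ps =>
    have hip : i < p := h p (by simp)
    simp [pvLoopB, pvAdvanceB, hip]

theorem pvAdvanceB_fix (os : List Int) (k : Nat) (p : Int) (h : ∀ o ∈ os, ¬ o < p) :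
    pvAdvanceB os k p = (os, k) := by
  cases os with
  | nil => simp [pvAdvanceB]
  | cons o os' => simp [pvAdvanceB, h o (by simp)]

-- lock-step: A's stack loop over the chars after the first opener equals B's two-pointer loop
-- over the index lists of those chars (k = r + stack depth)
theorem pvLoopA_eq_pvLoopB (l : List Char) (st : Int) :
    ∀ (t : List Char) (j : Int) (sk : List Char) (k r : Nat),
      sk ≠ [] → k = r + sk.length →
      pvLoopA l st t j sk = pvLoopB l st (openIdx t j) k (closeIdx t j) r := by
  intro t
  induction t with
  | nil => intro j sk k r hne hk; simp [pvLoopA, openIdx, closeIdx, pvLoopB]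
  | cons c rest ih =>
    intro j sk k r hne hk
    by_cases hop : c = '{' ∨ c = '['
    · have hop' : ¬ (c = ']' ∨ c = '}') := by
        rcases hop with h | h <;> subst h <;> decide
      simp [pvLoopA, openIdx, closeIdx, hop, hop']
      rw [pvLoopB_shift l st j (openIdx rest (j + 1)) k r (closeIdx rest (j + 1))
        (fun p hp => by have := mem_closeIdx_ge rest (j + 1) p hp; omega)]
      exact ih (j + 1) (c :: sk) (k + 1) r (by simp) (by simp [List.length_cons]; omega)
    · by_cases hcl : c = ']' ∨ c = '}'
      · simp [openIdx, closeIdx, hop, hcl]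
        match sk, hne with
        | h0 :: tl, _ =>
          rw [show pvLoopB l st (openIdx rest (j + 1)) k (j :: closeIdx rest (j + 1)) r =
              (if k = r + 1 then String.ofList (PySem.List.slice l (some st) (some (j + 1)))
               else pvLoopB l st (openIdx rest (j + 1)) k (closeIdx rest (j + 1)) (r + 1)) from by
            simp only [pvLoopB]
            rw [pvAdvanceB_fix (openIdx rest (j + 1)) k j
              (fun o ho => by have := mem_openIdx_ge rest (j + 1) o ho; omega)]]
          by_cases htl : tl = []
          · subst htl
            have : k = r + 1 := by simp at hk; omega
            simp [pvLoopA, hop, hcl, this]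
          · have hk' : ¬ k = r + 1 := by
              have : 1 ≤ tl.length := List.length_pos_iff.mpr htl
              simp [List.length_cons] at hk; omega
            simp [pvLoopA, hop, hcl, htl, hk']
            exact ih (j + 1) tl k (r + 1) htl (by simp [List.length_cons] at hk ⊢; omega)
      · simp [pvLoopA, openIdx, closeIdx, hop, hcl]
        exact ih (j + 1) sk k r hne hk

-- pvFindA characterisations
theorem pvFindA_ge : ∀ (t : List Char) (j : Int) (i : Int) (c : Char) (rest : List Char),
    pvFindA t j = some (i, c, rest) → j ≤ i := by
  intro t
  induction t with
  | nil => intro j i c rest h; simp [pvFindA] at h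
  | cons c0 rest0 ih =>
    intro j i c rest h
    by_cases hc : c0 = '{' ∨ c0 = '['
    · simp [pvFindA, hc] at h; omega
    · simp [pvFindA, hc] at h
      have := ih (j + 1) i c rest h; omega

theorem pvFindA_none_openIdx : ∀ (t : List Char) (j : Int),
    pvFindA t j = none → openIdx t j = [] := by
  intro t
  induction t with
  | nil => intro j _; simp [openIdx]
  | cons c rest ih =>
    intro j h
    by_cases hc : c = '{' ∨ c = '['
    · simp [pvFindA, hc] at h
    · simp [pvFindA, hc] at h
      simp [openIdx, hc, ih (j + 1) h]

theorem pvFindA_some_openIdx : ∀ (t : List Char) (j : Int) (i : Int) (c : Char) (rest : List Char),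
    pvFindA t j = some (i, c, rest) → openIdx t j = i :: openIdx rest (i + 1) := by
  intro t
  induction t with
  | nil => intro j i c rest h; simp [pvFindA] at h
  | cons c0 rest0 ih =>
    intro j i c rest h
    by_cases hc : c0 = '{' ∨ c0 = '['
    · simp [pvFindA, hc] at h
      obtain ⟨h1, _, h3⟩ := h
      subst h1; subst h3
      simp [openIdx, hc]
    · simp [pvFindA, hc] at h
      simp [openIdx, hc, ih (j + 1) i c rest h]

-- the opens comprehension is openIdx
theorem filter_open_eq_openIdx : ∀ (t : List Char) (j : Int),
    ((PySem.List.enumerate t j).filter (fun q => q.2 = '{' ∨ q.2 = '[')).map Prod.fst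
      = openIdx t j := by
  intro t
  induction t with
  | nil => intro j; simp [PySem.List.enumerate_nil, openIdx]
  | cons c rest ih =>
    intro j
    by_cases hc : c = '{' ∨ c = '['
    · simp [PySem.List.enumerate_cons, openIdx, hc]
      simpa using ih (j + 1)
    · simp [PySem.List.enumerate_cons, openIdx, hc]
      simpa using ih (j + 1)

-- the closes comprehension, once every index exceeds the bound, is closeIdx
theorem filter_close_gt_eq_closeIdx : ∀ (t : List Char) (j : Int) (j0 : Int), j0 < j →
    ((PySem.List.enumerate t j).filter (fun q => (q.2 = ']' ∨ q.2 = '}') ∧ j0 < q.1)).map Prod.fst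
      = closeIdx t j := by
  intro t
  induction t with
  | nil => intro j j0 _; simp [PySem.List.enumerate_nil, closeIdx]
  | cons c rest ih =>
    intro j j0 hj
    by_cases hc : c = ']' ∨ c = '}'
    · simp [PySem.List.enumerate_cons, closeIdx, hc, hj]
      simpa using ih (j + 1) j0 (by omega)
    · simp [PySem.List.enumerate_cons, closeIdx, hc, hj]
      simpa using ih (j + 1) j0 (by omega)

-- the closes comprehension over the whole list, with the bound at the first opener
theorem filter_close_eq_closeIdx : ∀ (t : List Char) (j : Int) (i : Int) (c : Char) (rest : List Char),
    pvFindA t j = some (i, c, rest) →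
    ((PySem.List.enumerate t j).filter (fun q => (q.2 = ']' ∨ q.2 = '}') ∧ i < q.1)).map Prod.fst
      = closeIdx rest (i + 1) := by
  intro t
  induction t with
  | nil => intro j i c rest h; simp [pvFindA] at h
  | cons c0 rest0 ih =>
    intro j i c rest h
    by_cases hc : c0 = '{' ∨ c0 = '['
    · simp [pvFindA, hc] at h
      obtain ⟨h1, _, h3⟩ := h
      subst h1; subst h3
      simp [PySem.List.enumerate_cons]
      simpa using filter_close_gt_eq_closeIdx rest0 (j + 1) j (by omega)
    · simp [pvFindA, hc] at h
      have hji : j + 1 ≤ i := pvFindA_ge rest0 (j + 1) i c rest h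
      by_cases hcl : c0 = ']' ∨ c0 = '}'
      · simp [PySem.List.enumerate_cons, show ¬ i < j by omega]
        simpa using ih (j + 1) i c rest h
      · simp [PySem.List.enumerate_cons, hcl]
        simpa using ih (j + 1) i c rest h

-- the whole-body equality, stated without the ports' let-bindings
theorem body_eq (l : List Char) :
    (match pvFindA l 0 with
     | none => String.ofList l
     | some (i, c, rest) => pvLoopA l i rest (i + 1) [c]) =
    (match ((PySem.List.enumerate l 0).filter (fun q => q.2 = '{' ∨ q.2 = '[')).map Prod.fst with
     | [] => String.ofList l
     | start :: _ =>
       pvLoopB l start (((PySem.List.enumerate l 0).filter (fun q => q.2 = '{' ∨ q.2 = '[')).map Prod.fst) 0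
         (((PySem.List.enumerate l 0).filter (fun q => (q.2 = ']' ∨ q.2 = '}') ∧ start < q.1)).map Prod.fst) 0) := by
  rw [filter_open_eq_openIdx]
  cases h : pvFindA l 0 with
  | none => rw [pvFindA_none_openIdx _ 0 h]
  | some v =>
    obtain ⟨i, c, rest⟩ := v
    rw [pvFindA_some_openIdx _ 0 i c rest h]
    simp only
    rw [filter_close_eq_closeIdx _ 0 i c rest h]
    rw [pvLoopB_shift _ i i (openIdx rest (i + 1)) 0 0 (closeIdx rest (i + 1))
      (fun p hp => by have := mem_closeIdx_ge rest (i + 1) p hp; omega)]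
    simpa using pvLoopA_eq_pvLoopB l i rest (i + 1) [c] 1 0 (by simp) (by simp)

-- ===== VERDICT (by name: the statement is the Claim_ definition above) =====
set_option maxHeartbeats 1000000 in
theorem extract_first_bracketed_spec : Claim_equal_extract_first_bracketed := by
  intro s _
  unfold Spec_extract_first_bracketed extract_first_bracketed extract_first_bracketed_alt
  exact body_eq ((PySem.Str.strip s).toList)
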